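-- pv_equiv track=rewrite | github.com/Subho-Ghosh/DS_Acad | Jio_hackathon/jio_prob_win_lose.py | setPlayer
-- ===== SOURCE A (Python) =====
-- def checkEng(veng,plist):
--     plist.sort()
--     ret = None
--     for peng in plist:
--         if peng >= veng:
--             ret = peng
--             break
--
--     return ret
--
-- def setPlayer(vlist,plist):
--     resmatrix = []
--     for veng in vlist:
--         peng = checkEng(veng,plist)
--         if peng:
--             resmatrix.append((veng,peng,'WIN'))
--             plist.remove(peng)
--         else :
--             resmatrix.append((veng,'','LOSE'))
--
--     if all(item[2] == 'WIN' for item in resmatrix):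
--         return 'WIN'
--     else :
--         return 'LOSE'
-- ===== SOURCE B (Python) =====
-- def setPlayer(vlist, plist):
--     avail = sorted(plist)          # one sorted copy; the caller's plist is not mutated
--     for veng in vlist:
--         # binary search for the first available peng >= veng
--         lo, hi = 0, len(avail)
--         while lo < hi:
--             mid = (lo + hi) // 2
--             if avail[mid] < veng:
--                 lo = mid + 1
--             else:
--                 hi = mid
--         peng = avail[lo] if lo < len(avail) else None
--         if not peng:
--             return 'LOSE'
--         avail.pop(lo)
--     return 'WIN'
-- ===== Notes on version B (the rewrite author's own statement) =====
-- stated objective: faster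
-- what changed: B sorts plist once and then finds each veng's smallest available peng by binary search on the maintained sorted list (with an early return on the first LOSE), instead of A's re-sorting plist and linearly scanning it (plus a linear remove and a final all() pass) on every iteration.
import Mathlib
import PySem

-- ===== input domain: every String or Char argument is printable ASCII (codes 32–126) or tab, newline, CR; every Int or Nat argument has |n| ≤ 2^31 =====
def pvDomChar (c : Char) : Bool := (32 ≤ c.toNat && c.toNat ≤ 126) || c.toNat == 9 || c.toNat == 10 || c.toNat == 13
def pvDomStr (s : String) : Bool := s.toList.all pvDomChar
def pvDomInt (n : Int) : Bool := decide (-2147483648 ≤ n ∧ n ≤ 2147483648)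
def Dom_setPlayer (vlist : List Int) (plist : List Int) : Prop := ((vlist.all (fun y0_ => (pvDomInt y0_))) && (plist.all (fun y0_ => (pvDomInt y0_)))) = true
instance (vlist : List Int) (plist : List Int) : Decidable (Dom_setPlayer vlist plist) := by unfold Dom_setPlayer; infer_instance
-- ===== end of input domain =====

-- B sorts plist once and binary-searches a maintained sorted list with an early return,
-- instead of A's per-veng re-sort + linear scan + linear remove + final all() pass.
-- Return-value equivalence only: Python A mutates its plist argument (sort/remove); B does not.

-- ===== PORT A =====
-- 'plist.sort()' mutates: checkEng returns (ret, the sorted list) and the caller continues with it.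
def checkEng (veng : Int) (plist : List Int) : Option Int × List Int :=
  let ps := PySem.List.sorted plist (fun x => x)
  -- 'for peng in plist: if peng >= veng: ret = peng; break' = first element ≥ veng
  (ps.find? (fun peng => decide (veng ≤ peng)), ps)

-- the for-loop of setPlayer; resmatrix rows are (veng, peng-or-'' , status); Python's '' in the
-- LOSE rows is modelled as 'none' (Option Int) — exact for the result, which only reads row.2.2.
def setPlayerGo : List Int → List Int → List (Int × Option Int × String) → List (Int × Option Int × String)
  | [], _, res => res
  | veng :: vs, plist, res =>
    let r := checkEng veng plist
    match r.1 with
    | some p =>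
      -- 'if peng:' — truthy iff peng is neither None nor 0
      if p ≠ 0 then
        -- plist.remove(peng): peng ∈ plist always holds here, so getD never takes the default
        setPlayerGo vs ((PySem.List.remove? r.2 p).getD r.2) (res ++ [(veng, some p, "WIN")])
      else
        setPlayerGo vs r.2 (res ++ [(veng, none, "LOSE")])
    | none => setPlayerGo vs r.2 (res ++ [(veng, none, "LOSE")])

def setPlayer (vlist : List Int) (plist : List Int) : String :=
  let res := setPlayerGo vlist plist []
  if res.all (fun item => item.2.2 == "WIN") then "WIN" else "LOSE"

-- ===== PORT B =====
-- the hand-written while-loop binary search of Source B (first index with avail[i] >= veng)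
def bsearchGo (avail : List Int) (veng : Int) (lo hi : Nat) : Nat :=
  if lo < hi then
    let mid := (lo + hi) / 2
    -- avail[mid]: mid < hi ≤ len(avail) whenever the loop runs on Source B's inputs, so getD is exact
    if avail.getD mid 0 < veng then bsearchGo avail veng (mid + 1) hi
    else bsearchGo avail veng lo mid
  else lo
termination_by hi - lo
decreasing_by all_goals omega

def setPlayerAltGo : List Int → List Int → String
  | [], _ => "WIN"
  | veng :: vs, avail =>
    let lo := bsearchGo avail veng 0 avail.length
    -- peng = avail[lo] if lo < len(avail) else None  (getD exact under the guard)
    let peng : Option Int := if lo < avail.length then some (avail.getD lo 0) else none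
    match peng with
    | some p =>
      -- 'if not peng: return LOSE' — continue only on a truthy (nonzero) peng
      if p ≠ 0 then setPlayerAltGo vs (avail.eraseIdx lo)  -- avail.pop(lo), value unused
      else "LOSE"
    | none => "LOSE"

def setPlayer_alt (vlist : List Int) (plist : List Int) : String :=
  setPlayerAltGo vlist (PySem.List.sorted plist (fun x => x))

-- ===== PRECONDITION & SPEC =====
def Spec_setPlayer (vlist : List Int) (plist : List Int) (out : String) : Prop := out = setPlayer_alt vlist plist
instance (vlist : List Int) (plist : List Int) (out : String) : Decidable (Spec_setPlayer vlist plist out) := by unfold Spec_setPlayer; infer_instance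

-- ===== CLAIM (what is proved, stated in full; the proofs are below) =====
def Claim_equal_setPlayer : Prop := ∀ (vlist : List Int) (plist : List Int), Dom_setPlayer vlist plist → Spec_setPlayer vlist plist (setPlayer vlist plist)

-- ===== LEMMAS AND PROOFS =====

-- the index of the first element ≥ v in a sorted list (= length of its '< v' prefix)
def kIdx (s : List Int) (v : Int) : Nat := (s.takeWhile (fun x => decide (x < v))).length

theorem kIdx_le_length (s : List Int) (v : Int) : kIdx s v ≤ s.length := by
  simpa using List.Sublist.length_le (List.takeWhile_sublist (l := s) (fun x => decide (x < v)))

theorem kIdx_lt_iff (s : List Int) (hs : s.Pairwise (· ≤ ·)) (v : Int)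
    (i : Nat) (hi : i < s.length) : i < kIdx s v ↔ s[i] < v := by
  induction s generalizing i with
  | nil => simp at hi
  | cons x t ih =>
    rcases List.pairwise_cons.mp hs with ⟨hx, ht⟩
    cases i with
    | zero =>
      by_cases hxv : x < v
      · simp [kIdx, hxv]
      · simp [kIdx, hxv]
    | succ j =>
      simp only [List.length_cons] at hi
      by_cases hxv : x < v
      · have := ih ht j (by omega)
        simp only [kIdx, List.takeWhile_cons, if_pos (by exact decide_eq_true hxv)] at *
        simpa [Nat.succ_lt_succ_iff] using this
      · constructor
        · intro h; simp [kIdx, hxv] at h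
        · intro h
          exfalso
          have hxt : x ≤ t[j] := hx _ (List.getElem_mem _)
          simp only [List.getElem_cons_succ] at h
          omega

theorem find?_eq_kIdx (s : List Int) (v : Int) :
    s.find? (fun x => decide (v ≤ x)) = s[kIdx s v]? := by
  have hfun : (fun x : Int => !decide (v ≤ x)) = (fun x => decide (x < v)) := by
    funext x; by_cases h : v ≤ x <;> simp [h]
    omega
  have base : (s.takeWhile (fun x : Int => decide (x < v)) ++ s.dropWhile (fun x : Int => decide (x < v)))[(s.takeWhile (fun x : Int => decide (x < v))).length]?
      = (s.dropWhile (fun x : Int => decide (x < v)))[(s.takeWhile (fun x : Int => decide (x < v))).length - (s.takeWhile (fun x : Int => decide (x < v))).length]? :=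
    List.getElem?_append_right (Nat.le_refl _)
  rw [List.takeWhile_append_dropWhile, Nat.sub_self] at base
  rw [List.find?_eq_head?_dropWhile_not, hfun, List.head?_eq_getElem?, kIdx, base]

theorem bsearchGo_eq (s : List Int) (hs : s.Pairwise (· ≤ ·)) (v : Int) :
    ∀ lo hi, hi ≤ s.length → lo ≤ kIdx s v → kIdx s v ≤ hi → bsearchGo s v lo hi = kIdx s v := by
  intro lo hi
  fun_induction bsearchGo s v lo hi with
  | case1 lo hi hlt mid hcond ih =>
    intro hhi hlo hk
    have hmlen : mid < s.length := by omega
    rw [List.getD_eq_getElem _ _ hmlen] at hcond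
    exact ih hhi (by have := (kIdx_lt_iff s hs v _ hmlen).mpr hcond; omega) hk
  | case2 lo hi hlt mid hcond ih =>
    intro hhi hlo hk
    have hmlen : mid < s.length := by omega
    rw [List.getD_eq_getElem _ _ hmlen] at hcond
    have hnk : ¬ (mid < kIdx s v) := fun h => hcond ((kIdx_lt_iff s hs v _ hmlen).mp h)
    exact ih (by omega) hlo (by omega)
  | case3 lo hi h =>
    intro hhi hlo hk; omega

theorem erase_getElem_eq_eraseIdx (l : List Int) : ∀ (k : Nat) (hk : k < l.length),
    (∀ j, (hj : j < k) → (hj' : j < l.length) → l[j] ≠ l[k]) →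
    l.erase l[k] = l.eraseIdx k := by
  induction l with
  | nil => intro k hk; simp at hk
  | cons x t ih =>
    intro k hk h
    cases k with
    | zero => simp
    | succ j =>
      have hjt : j < t.length := by simpa using Nat.lt_of_succ_lt_succ hk
      have hx : x ≠ t[j] := by
        have := h 0 (by omega) (by simp)
        simpa using this
      simp only [List.getElem_cons_succ, List.eraseIdx_cons_succ]
      rw [List.erase_cons_tail (by simpa using hx)]
      rw [ih j hjt (fun i hi hi' => by
        have := h (i+1) (by omega) (by simp; omega)
        simpa using this)]

theorem loop_eq (vs : List Int) : ∀ (ps : List Int) (res : List (Int × Option Int × String)),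
    (if (setPlayerGo vs ps res).all (fun it => it.2.2 == "WIN") then "WIN" else "LOSE")
    = if res.all (fun it => it.2.2 == "WIN") then setPlayerAltGo vs (PySem.List.sorted ps (fun x => x)) else "LOSE" := by
  induction vs with
  | nil =>
    intro ps res
    simp only [setPlayerGo, setPlayerAltGo]
    split <;> rfl
  | cons veng vs ih =>
    intro ps res
    have hsrt : (PySem.List.sorted ps (fun x => x)).Pairwise (· ≤ ·) :=
      PySem.List.sorted_pairwise ps (fun x => x)
    set s := PySem.List.sorted ps (fun x => x) with hsdef
    have hk := bsearchGo_eq s hsrt veng 0 s.length (Nat.le_refl _) (Nat.zero_le _) (kIdx_le_length s veng)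
    simp only [setPlayerGo, checkEng, setPlayerAltGo, ← hsdef, hk, find?_eq_kIdx]
    by_cases hklen : kIdx s veng < s.length
    · rw [List.getElem?_eq_getElem hklen]
      simp only [if_pos hklen, List.getD_eq_getElem s 0 hklen]
      by_cases hz : s[kIdx s veng] = 0
      · simp only [hz, ne_eq, not_true_eq_false, if_false]
        rw [ih]
        simp [List.all_append, show (("LOSE":String) == "WIN") = false from rfl]
      · simp only [if_pos hz]
        have hmem : s[kIdx s veng] ∈ s := List.getElem_mem _
        rw [PySem.List.remove?_eq_some_erase s _ hmem]
        have herase : s.erase s[kIdx s veng] = s.eraseIdx (kIdx s veng) := by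
          apply erase_getElem_eq_eraseIdx s _ hklen
          intro j hj hj'
          have h1 : s[j] < veng := (kIdx_lt_iff s hsrt veng j hj').mp hj
          have h2 : ¬ s[kIdx s veng] < veng := by
            intro hcon
            exact absurd ((kIdx_lt_iff s hsrt veng _ hklen).mpr hcon) (by omega)
          omega
        simp only [Option.getD_some, herase]
        rw [ih]
        have hsub : (s.eraseIdx (kIdx s veng)).Pairwise (· ≤ ·) :=
          List.Pairwise.sublist (List.eraseIdx_sublist ..) hsrt
        rw [PySem.List.sorted_eq_self_of_pairwise _ _ hsub]
        have hall : (res ++ [(veng, some s[kIdx s veng], "WIN")]).all (fun it => it.2.2 == "WIN") = res.all (fun it => it.2.2 == "WIN") := by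
          rw [List.all_append]; simp
        rw [hall]
    · rw [List.getElem?_eq_none (by omega)]
      simp only [if_neg hklen]
      rw [ih]
      simp [List.all_append, show (("LOSE":String) == "WIN") = false from rfl]

-- ===== VERDICT (by name: the statement is the Claim_ definition above) =====
theorem setPlayer_spec : Claim_equal_setPlayer := by
  intro vlist plist _
  unfold Spec_setPlayer setPlayer setPlayer_alt
  simpa using loop_eq vlist plist []
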